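-- pv_equiv track=rewrite | github.com/heestogram/codetest | programmers/python/둘만의암호.py | solution
-- ===== SOURCE A (Python) =====
-- def solution(s, skip, index):
--     alpha = 'abcdefghijklmnopqrstuvwxyz'
--     stack = []
--     answer=""
--     for alp in alpha:
--         stack.append(alp)
--
--     for word in s:
--         idx=index
--         cur = stack.index(word)
--         while idx>0:
--             cur += 1
--             if cur>25:
--                 cur = 0
--             if stack[cur] in skip:
--                 continue
--             idx-=1
--         answer += stack[cur]
--     return answer
-- ===== SOURCE B (Python) =====
-- def solution(s, skip, index):
--     alpha = 'abcdefghijklmnopqrstuvwxyz'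
--     allowed = [c for c in alpha if c not in skip]
--     if index <= 0:
--         return s
--     n = len(allowed)
--     out = []
--     for ch in s:
--         pos = alpha.index(ch)
--         start = sum(1 for c in alpha[:pos + 1] if c not in skip)
--         out.append(allowed[(start + index - 1) % n])
--     return ''.join(out)
-- ===== Notes on version B (the rewrite author's own statement) =====
-- stated objective: faster
-- what changed: Replaces the per-character step-by-step walk (index iterations, each scanning the 26-letter ring past skip letters) by a closed form: precompute the non-skip alphabet once and jump straight to allowed[(rank(ch)+index-1) % len(allowed)] with modular arithmetic; index<=0 returns s unchanged.
import Mathlib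
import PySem

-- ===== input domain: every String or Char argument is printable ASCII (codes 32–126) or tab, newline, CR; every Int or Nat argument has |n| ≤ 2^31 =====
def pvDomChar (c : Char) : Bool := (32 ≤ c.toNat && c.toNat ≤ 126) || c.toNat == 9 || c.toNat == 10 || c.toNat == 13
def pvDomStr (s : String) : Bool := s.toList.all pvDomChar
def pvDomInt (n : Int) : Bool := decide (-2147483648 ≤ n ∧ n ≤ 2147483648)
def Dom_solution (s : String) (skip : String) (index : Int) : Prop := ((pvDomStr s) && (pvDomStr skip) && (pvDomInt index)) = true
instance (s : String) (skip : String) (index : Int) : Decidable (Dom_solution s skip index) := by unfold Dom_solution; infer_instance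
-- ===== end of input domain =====

-- B replaces A's per-character step simulation by a closed-form modular jump into the
-- precomputed non-skip alphabet (equivalence is about the return value; neither mutates).

-- ===== PORT A =====
-- A's inner while loop, totalized: each pass of the Python loop that lands on a skip
-- letter is one step of the scan below (fuel 52 is slack covering a full wrap of the 26
-- positions before the next idx decrement); the outer recursion counts the decrements
-- of idx, exactly as Python interleaves them.  When every letter is in skip and idx > 0
-- the Python loop diverges (excluded by Pre_).
def scanA (stack : List Char) (skip : String) : Nat → Nat → Nat
  | 0, cur => cur
  | fuel + 1, cur =>
    let cur1 := cur + 1                                   -- cur += 1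
    let cur2 := if cur1 > 25 then 0 else cur1             -- if cur > 25: cur = 0
    if PySem.Chars.isIn [stack.getD cur2 ' '] skip.toList -- if stack[cur] in skip: continue
    then scanA stack skip fuel cur2
    else cur2                                             -- idx -= 1 happens here

def whileA (stack : List Char) (skip : String) : Nat → Nat → Nat
  | 0, cur => cur
  | k + 1, cur => whileA stack skip k (scanA stack skip 52 cur)

def solution (s : String) (skip : String) (index : Int) : String :=
  let alpha := "abcdefghijklmnopqrstuvwxyz"
  let stack := alpha.toList.foldl (fun st alp => st ++ [alp]) []
  let answer := s.toList.foldl (fun ans word =>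
    let cur := (PySem.List.index? stack word).getD 0      -- stack.index(word); ValueError excluded by Pre_
    let cur' := whileA stack skip index.toNat cur         -- the 'while idx > 0' loop
    ans ++ [stack.getD cur' ' ']) []                      -- answer += stack[cur]
  String.ofList answer

-- ===== PORT B =====
def solution_alt (s : String) (skip : String) (index : Int) : String :=
  let alpha := "abcdefghijklmnopqrstuvwxyz"
  let allowed := alpha.toList.filter (fun c => !(PySem.Chars.isIn [c] skip.toList))
  if index ≤ 0 then s
  else
    let n : Int := allowed.length
    String.ofList (s.toList.map (fun ch =>
      let pos := (PySem.List.index? alpha.toList ch).getD 0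
      let start : Int := ((alpha.toList.take (pos + 1)).filter
                            (fun c => !(PySem.Chars.isIn [c] skip.toList))).length
      (PySem.List.pyGet? allowed (PySem.Int.mod (start + index - 1) n)).getD ' '))

-- ===== PRECONDITION & SPEC =====
-- Pre_ excludes exactly the inputs where A does not return: a character of s outside
-- 'a'..'z' (stack.index raises ValueError) and the case index > 0, s nonempty, with all
-- 26 letters in skip (the while loop never terminates).
def Pre_solution (s : String) (skip : String) (index : Int) : Prop :=
  (s.toList.all (fun c => "abcdefghijklmnopqrstuvwxyz".toList.contains c) = true) ∧
  (index ≤ 0 ∨ s.toList = [] ∨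
    "abcdefghijklmnopqrstuvwxyz".toList.any (fun c => !(skip.toList.contains c)) = true)
instance (s : String) (skip : String) (index : Int) : Decidable (Pre_solution s skip index) := by
  unfold Pre_solution; infer_instance

def pvWitness_solution : String × String × Int := ("aks", "wbqd", 5)

def Spec_solution (s : String) (skip : String) (index : Int) (out : String) : Prop := out = solution_alt s skip index
instance (s : String) (skip : String) (index : Int) (out : String) : Decidable (Spec_solution s skip index out) := by unfold Spec_solution; infer_instance

-- ===== CLAIM (what is proved, stated in full; the proofs are below) =====
def Claim_equal_solution : Prop := ∀ (s : String) (skip : String) (index : Int), Dom_solution s skip index → Pre_solution s skip index → Spec_solution s skip index (solution s skip index)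

-- ===== LEMMAS AND PROOFS =====

-- proof-side names: the fixed alphabet, the "not in skip" predicate, and the number of
-- allowed letters among the first cur+1 alphabet positions
def aL : List Char := "abcdefghijklmnopqrstuvwxyz".toList
def pAllow (skip : String) (c : Char) : Bool := !(PySem.Chars.isIn [c] skip.toList)
def gcount (skip : String) (cur : Nat) : Nat := ((aL.take (cur + 1)).filter (pAllow skip)).length

lemma aL_length : aL.length = 26 := by decide

lemma isIn_singleton (c : Char) (l : List Char) : PySem.Chars.isIn [c] l = l.contains c := by
  by_cases h : c ∈ l
  · rw [(PySem.Chars.isIn_iff_infix _ _).mpr ((List.singleton_infix_iff c l).mpr h)]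
    simp [h]
  · rw [(PySem.Chars.isIn_eq_false_iff _ _).mpr (fun hin => h ((List.singleton_infix_iff c l).mp hin))]
    simp [h]

lemma gcount_le (skip : String) (cur : Nat) :
    gcount skip cur ≤ (aL.filter (pAllow skip)).length := by
  unfold gcount
  exact ((List.take_prefix _ _).filter _).length_le

lemma gcount_top (skip : String) : gcount skip 25 = (aL.filter (pAllow skip)).length := by
  unfold gcount
  rw [List.take_of_length_le (by rw [aL_length])]

lemma gcount_succ (skip : String) (cur : Nat) (h : cur + 1 < 26) :
    gcount skip (cur + 1) =
      gcount skip cur + (if pAllow skip (aL[cur + 1]'(by rw [aL_length]; omega)) then 1 else 0) := by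
  unfold gcount
  rw [List.take_add_one, List.getElem?_eq_getElem (by rw [aL_length]; omega), List.filter_append]
  simp [List.filter]
  split <;> simp_all

lemma gcount_zero (skip : String) :
    gcount skip 0 = if pAllow skip (aL[0]'(by decide)) then 1 else 0 := by
  unfold gcount
  have h1 : aL.take 1 = [aL[0]'(by decide)] := by decide
  rw [h1]
  simp [List.filter]
  split <;> simp_all

-- the rank lemma: an allowed position q reads back as element gcount q - 1 of the filtered list
lemma rank_lemma (skip : String) (q : Nat) (hq : q < 26)
    (hp : pAllow skip (aL[q]'(by rw [aL_length]; omega)) = true) :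
    (aL.filter (pAllow skip))[gcount skip q - 1]? = some (aL[q]'(by rw [aL_length]; omega)) := by
  have hsplit : aL = aL.take (q + 1) ++ aL.drop (q + 1) := (List.take_append_drop _ _).symm
  have htake : aL.take (q + 1) = aL.take q ++ [aL[q]'(by rw [aL_length]; omega)] := by
    rw [List.take_add_one, List.getElem?_eq_getElem (by rw [aL_length]; omega)]
    rfl
  have hg : gcount skip q = ((aL.take q).filter (pAllow skip)).length + 1 := by
    unfold gcount
    rw [htake, List.filter_append]
    simp [List.filter, hp]
  conv_lhs => rw [hsplit, List.filter_append, htake, List.filter_append]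
  rw [hg]
  simp [List.filter, hp]

-- scan, no-wrap regime: some allowed position lies strictly after cur
lemma scanA_of_lt (skip : String) :
    ∀ (fuel cur : Nat), cur < 26 → gcount skip cur < (aL.filter (pAllow skip)).length →
      26 - cur ≤ fuel →
      (scanA aL skip fuel cur < 26 ∧
       pAllow skip (aL.getD (scanA aL skip fuel cur) ' ') = true ∧
       gcount skip (scanA aL skip fuel cur) = gcount skip cur + 1) := by
  intro fuel
  induction fuel with
  | zero => intro cur hc hg hf; omega
  | succ fuel ih =>
    intro cur hc hg hf
    have hne : cur ≠ 25 := by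
      intro h; rw [h, gcount_top] at hg; omega
    have hlt : cur + 1 < 26 := by omega
    have hwrap : ¬ (cur + 1 > 25) := by omega
    have hgetD : aL.getD (cur + 1) ' ' = aL[cur + 1]'(by rw [aL_length]; omega) :=
      List.getD_eq_getElem _ _ (by rw [aL_length]; omega)
    by_cases hp : pAllow skip (aL[cur + 1]'(by rw [aL_length]; omega)) = true
    · have hcond : PySem.Chars.isIn [aL.getD (cur + 1) ' '] skip.toList = false := by
        rw [hgetD]; simpa [pAllow] using hp
      have hstep : scanA aL skip (fuel + 1) cur = cur + 1 := by
        simp only [scanA, hwrap, if_false, hcond, Bool.false_eq_true]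
      rw [hstep]
      refine ⟨hlt, by rw [hgetD]; exact hp, ?_⟩
      rw [gcount_succ skip cur hlt, if_pos hp]
    · have hcond : PySem.Chars.isIn [aL.getD (cur + 1) ' '] skip.toList = true := by
        rw [hgetD]; simp [pAllow] at hp; exact hp
      have hstep : scanA aL skip (fuel + 1) cur = scanA aL skip fuel (cur + 1) := by
        simp only [scanA, hwrap, if_false, hcond, if_true]
      have hgeq : gcount skip (cur + 1) = gcount skip cur := by
        rw [gcount_succ skip cur hlt, if_neg hp]; omega
      rw [hstep]
      have h2 := ih (cur + 1) hlt (by rw [hgeq]; exact hg) (by omega)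
      exact ⟨h2.1, h2.2.1, by rw [h2.2.2, hgeq]⟩

-- scan, wrap regime: no allowed position after cur; the scan wraps and finds the first one
lemma scanA_of_eq (skip : String) :
    ∀ (fuel cur : Nat), cur < 26 → gcount skip cur = (aL.filter (pAllow skip)).length →
      0 < (aL.filter (pAllow skip)).length → 52 - cur ≤ fuel →
      (scanA aL skip fuel cur < 26 ∧
       pAllow skip (aL.getD (scanA aL skip fuel cur) ' ') = true ∧
       gcount skip (scanA aL skip fuel cur) = 1) := by
  intro fuel
  induction fuel with
  | zero => intro cur hc hg hn hf; omega
  | succ fuel ih =>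
    intro cur hc hg hn hf
    by_cases hne : cur = 25
    · subst hne
      have hwrap : (25 + 1 > 25) := by omega
      have hgetD : aL.getD 0 ' ' = aL[0]'(by decide) := List.getD_eq_getElem _ _ (by decide)
      by_cases hp : pAllow skip (aL[0]'(by decide)) = true
      · have hcond : PySem.Chars.isIn [aL.getD 0 ' '] skip.toList = false := by
          rw [hgetD]; simpa [pAllow] using hp
        have hstep : scanA aL skip (fuel + 1) 25 = 0 := by
          simp only [scanA, hwrap, if_true, hcond, Bool.false_eq_true, if_false]
        rw [hstep]
        refine ⟨by omega, by rw [hgetD]; exact hp, ?_⟩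
        rw [gcount_zero, if_pos hp]
      · have hcond : PySem.Chars.isIn [aL.getD 0 ' '] skip.toList = true := by
          rw [hgetD]; simp [pAllow] at hp; exact hp
        have hstep : scanA aL skip (fuel + 1) 25 = scanA aL skip fuel 0 := by
          simp only [scanA, hwrap, if_true, hcond]
        have hg0 : gcount skip 0 = 0 := by rw [gcount_zero, if_neg hp]
        rw [hstep]
        have h2 := scanA_of_lt skip fuel 0 (by omega) (by omega) (by omega)
        exact ⟨h2.1, h2.2.1, by omega⟩
    · have hlt : cur + 1 < 26 := by omega
      have hwrap : ¬ (cur + 1 > 25) := by omega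
      have hgle := gcount_le skip (cur + 1)
      have hgsucc := gcount_succ skip cur hlt
      have hp : ¬ pAllow skip (aL[cur + 1]'(by rw [aL_length]; omega)) = true := by
        intro hp; rw [if_pos hp] at hgsucc; omega
      have hgetD : aL.getD (cur + 1) ' ' = aL[cur + 1]'(by rw [aL_length]; omega) :=
        List.getD_eq_getElem _ _ (by rw [aL_length]; omega)
      have hcond : PySem.Chars.isIn [aL.getD (cur + 1) ' '] skip.toList = true := by
        rw [hgetD]; simp [pAllow] at hp; exact hp
      have hstep : scanA aL skip (fuel + 1) cur = scanA aL skip fuel (cur + 1) := by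
        simp only [scanA, hwrap, if_false, hcond, if_true]
      rw [hstep]
      exact ih (cur + 1) hlt (by omega) hn (by omega)

-- master scan lemma with fuel 52
lemma scanA_spec (skip : String) (cur : Nat) (hc : cur < 26)
    (hn : 0 < (aL.filter (pAllow skip)).length) :
    (scanA aL skip 52 cur < 26 ∧
     pAllow skip (aL.getD (scanA aL skip 52 cur) ' ') = true ∧
     gcount skip (scanA aL skip 52 cur) =
       gcount skip cur % (aL.filter (pAllow skip)).length + 1) := by
  have hle := gcount_le skip cur
  by_cases h : gcount skip cur < (aL.filter (pAllow skip)).length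
  · have h2 := scanA_of_lt skip 52 cur hc h (by omega)
    rw [Nat.mod_eq_of_lt h]
    exact h2
  · have heq : gcount skip cur = (aL.filter (pAllow skip)).length := by omega
    have h2 := scanA_of_eq skip 52 cur hc heq hn (by omega)
    rw [heq, Nat.mod_self]
    exact h2

-- the outer loop: after k ≥ 1 decrements the position has rank (gcount cur + k - 1) % n
lemma whileA_spec (skip : String) :
    ∀ (k cur : Nat), 0 < k → cur < 26 → 0 < (aL.filter (pAllow skip)).length →
      (whileA aL skip k cur < 26 ∧
       pAllow skip (aL.getD (whileA aL skip k cur) ' ') = true ∧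
       gcount skip (whileA aL skip k cur) =
         (gcount skip cur + (k - 1)) % (aL.filter (pAllow skip)).length + 1) := by
  intro k
  induction k with
  | zero => intro cur h; omega
  | succ k ih =>
    intro cur _ hc hn
    have hscan := scanA_spec skip cur hc hn
    rcases Nat.eq_zero_or_pos k with hk | hk
    · subst hk
      have hstep : whileA aL skip 1 cur = scanA aL skip 52 cur := rfl
      rw [hstep]
      refine ⟨hscan.1, hscan.2.1, ?_⟩
      rw [hscan.2.2]; simp
    · have hstep : whileA aL skip (k + 1) cur = whileA aL skip k (scanA aL skip 52 cur) := rfl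
      rw [hstep]
      have h2 := ih (scanA aL skip 52 cur) hk hscan.1 hn
      refine ⟨h2.1, h2.2.1, ?_⟩
      rw [h2.2.2, hscan.2.2]
      have h1 : gcount skip cur % (aL.filter (pAllow skip)).length + 1 + (k - 1)
          = gcount skip cur % (aL.filter (pAllow skip)).length + k := by omega
      rw [h1, Nat.mod_add_mod]
      congr 2

-- ===== VERDICT (by name: the statement is the Claim_ definition above) =====
lemma perchar (skip : String) (index : Int) (hipos : 0 < index) (ch : Char)
    (hch : ch ∈ aL) (hn : 0 < (aL.filter (pAllow skip)).length) :
    aL.getD (whileA aL skip index.toNat ((PySem.List.index? aL ch).getD 0)) ' ' =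
      (PySem.List.pyGet? (aL.filter (pAllow skip))
        (PySem.Int.mod
          ((((aL.take (((PySem.List.index? aL ch).getD 0) + 1)).filter (pAllow skip)).length : Int)
            + index - 1)
          ((aL.filter (pAllow skip)).length : Int))).getD ' ' := by
  obtain ⟨k, hk⟩ := Option.isSome_iff_exists.mp ((PySem.List.index?_isSome_iff aL ch).mpr hch)
  obtain ⟨hklen, hkch, -⟩ := PySem.List.getElem_of_index?_eq_some hk
  have hk26 : k < 26 := by rw [aL_length] at hklen; exact hklen
  rw [hk]
  simp only [Option.getD_some]
  have ht : 0 < index.toNat := by omega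
  have hW := whileA_spec skip index.toNat k ht hk26 hn
  set r := whileA aL skip index.toNat k with hr
  have hr26 : r < 26 := hW.1
  have hgetDr : aL.getD r ' ' = aL[r]'(by rw [aL_length]; omega) :=
    List.getD_eq_getElem _ _ (by rw [aL_length]; omega)
  have hpr : pAllow skip (aL[r]'(by rw [aL_length]; omega)) = true := by
    rw [← hgetDr]; exact hW.2.1
  have hrank := rank_lemma skip r hr26 hpr
  -- the Int index B computes is the Nat index (gcount k + (toNat index - 1)) % n
  have hcast : (((aL.take (k + 1)).filter (pAllow skip)).length : Int) + index - 1
      = ((gcount skip k + (index.toNat - 1) : Nat) : Int) := by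
    unfold gcount; push_cast; omega
  rw [PySem.Int.mod_eq_emod_of_pos (by exact_mod_cast hn), hcast, ← Int.natCast_emod,
    PySem.List.pyGet?_natCast]
  have hidx : (gcount skip k + (index.toNat - 1)) % (aL.filter (pAllow skip)).length
      = gcount skip r - 1 := by
    rw [hW.2.2]; omega
  rw [hidx, hrank, Option.getD_some, hgetDr]

theorem solution_spec : Claim_equal_solution := by
  intro s skip index _ hpre
  unfold Spec_solution solution solution_alt
  obtain ⟨hchars0, hdisj0⟩ := hpre
  have hchars : ∀ c ∈ s.toList, c ∈ aL := by
    intro c hc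
    exact List.contains_iff_mem.mp (List.all_eq_true.mp hchars0 c hc)
  have hdisj : index ≤ 0 ∨ s.toList = [] ∨ ∃ c ∈ aL, c ∉ skip.toList := by
    rcases hdisj0 with h | h | h
    · exact Or.inl h
    · exact Or.inr (Or.inl h)
    · obtain ⟨c, hc1, hc2⟩ := List.any_eq_true.mp h
      refine Or.inr (Or.inr ⟨c, hc1, fun hmem => ?_⟩)
      rw [List.contains_iff_mem.mpr hmem] at hc2
      cases hc2
  simp only [PySem.List.foldl_append_singleton, PySem.List.foldl_append_singleton_eq_map,
    List.nil_append, show "abcdefghijklmnopqrstuvwxyz".toList = aL from rfl,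
    show (fun c => !(PySem.Chars.isIn [c] skip.toList)) = pAllow skip from rfl]
  by_cases hile : index ≤ 0
  · rw [if_pos hile]
    have ht0 : index.toNat = 0 := by omega
    rw [ht0]
    have hmap : s.toList.map (fun word =>
        aL.getD (whileA aL skip 0 ((PySem.List.index? aL word).getD 0)) ' ') = s.toList := by
      rw [show s.toList = s.toList.map id by simp]
      simp only [List.map_map]
      apply List.map_congr_left
      intro ch hch
      obtain ⟨k, hk⟩ := Option.isSome_iff_exists.mp
        ((PySem.List.index?_isSome_iff aL ch).mpr (hchars ch hch))
      obtain ⟨hklen, hkch, -⟩ := PySem.List.getElem_of_index?_eq_some hk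
      simp only [Function.comp, id, hk, Option.getD_some, whileA]
      rw [List.getD_eq_getElem _ _ hklen, hkch]
    rw [hmap, String.ofList_toList]
  · rw [if_neg hile]
    have hipos : 0 < index := by omega
    congr 1
    apply List.map_congr_left
    intro ch hch
    have hchA : ch ∈ aL := hchars ch hch
    have hn : 0 < (aL.filter (pAllow skip)).length := by
      rcases hdisj with h | h | h
      · omega
      · rw [h] at hch; cases hch
      · obtain ⟨c, hcmem, hcnot⟩ := h
        have : c ∈ aL.filter (pAllow skip) := by
          apply List.mem_filter.mpr
          refine ⟨hcmem, ?_⟩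
          simp [pAllow, isIn_singleton, hcnot]
        exact List.length_pos_of_mem this
    exact perchar skip index hipos ch hchA hn
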